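-- pv_equiv track=rewrite | github.com/oogl/0004_reu_discrete_maths_word_equations | algorythm.py | return_answer_parts
-- ===== SOURCE A (Python) =====
-- def return_answer_parts(string):
--     concat_prefix, concat_suffix, result_parts = '', '', []
--     for char_index in range(len(string) - 1):
--         concat_prefix = concat_prefix + string[char_index]
--         concat_suffix = string[- char_index - 1] + concat_suffix
--         if concat_prefix == concat_suffix:
--             result_parts.append(concat_prefix)
--     return result_parts
-- ===== SOURCE B (Python) =====
-- def return_answer_parts(string):
--     # Border <-> period: the length-k prefix equals the length-k suffix
--     # iff string agrees with itself under shift p = n - k (pointwise check).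
--     n = len(string)
--     result = []
--     for p in range(n - 1, 0, -1):          # p = n-k, so k runs 1, 2, ..., n-1
--         if all(string[i] == string[i + p] for i in range(n - p)):
--             result.append(string[:n - p])
--     return result
-- ===== Notes on version B (the rewrite author's own statement) =====
-- stated objective: alternative
-- what changed: A grows explicit prefix/suffix strings and compares them at each length; B uses the border-period duality and, for each shift p = n-k, checks pointwise self-agreement string[i] == string[i+p] with a short-circuiting all(), building no intermediate comparison strings.
import Mathlib
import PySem

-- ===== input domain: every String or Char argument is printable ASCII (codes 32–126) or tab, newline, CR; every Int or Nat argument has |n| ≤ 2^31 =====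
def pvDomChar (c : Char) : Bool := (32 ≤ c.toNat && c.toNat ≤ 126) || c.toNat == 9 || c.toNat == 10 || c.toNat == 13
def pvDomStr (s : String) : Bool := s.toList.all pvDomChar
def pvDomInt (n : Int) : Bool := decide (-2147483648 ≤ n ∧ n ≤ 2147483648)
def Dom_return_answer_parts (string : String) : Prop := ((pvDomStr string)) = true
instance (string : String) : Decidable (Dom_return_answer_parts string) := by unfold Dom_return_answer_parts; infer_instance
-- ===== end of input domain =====

-- B replaces A's incremental prefix/suffix string building by the equivalent
-- period test (pointwise self-comparison under shift p = n - k); objective: alternative.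

-- ===== PORT A =====
-- A: grow concat_prefix / concat_suffix one character at a time; indices are always
-- in range (0 ≤ i < n-1 and -n ≤ -i-1 ≤ -1), so the .getD default is unreachable.
def return_answer_parts (string : String) : List String :=
  let s := string.toList
  let n : Int := s.length
  (((PySem.List.pyRange 0 (n - 1) 1).foldl
      (fun (st : List Char × List Char × List String) i =>
        let pre := st.1 ++ [(PySem.List.pyGet? s i).getD ' ']
        let suf := (PySem.List.pyGet? s (-i - 1)).getD ' ' :: st.2.1
        if pre = suf then (pre, suf, st.2.2 ++ [String.ofList pre]) else (pre, suf, st.2.2))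
      ([], [], []))).2.2

-- ===== PORT B =====
-- B: for each shift p = n-1, …, 1 (border length k = n - p), check pointwise
-- self-agreement s[i] = s[i+p]; indices always in range, defaults unreachable.
def return_answer_parts_alt (string : String) : List String :=
  let s := string.toList
  let n : Int := s.length
  (PySem.List.pyRange (n - 1) 0 (-1)).foldl
    (fun res p =>
      if (PySem.List.pyRange 0 (n - p) 1).all
          (fun i => PySem.List.pyGetD s i ' ' == PySem.List.pyGetD s (i + p) ' ')
        then res ++ [String.ofList (PySem.List.slice s none (some (n - p)))]
        else res)
    []

-- ===== PRECONDITION & SPEC =====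
def Spec_return_answer_parts (string : String) (out : List String) : Prop := out = return_answer_parts_alt string
instance (string : String) (out : List String) : Decidable (Spec_return_answer_parts string out) := by unfold Spec_return_answer_parts; infer_instance

-- ===== CLAIM (what is proved, stated in full; the proofs are below) =====
def Claim_equal_return_answer_parts : Prop := ∀ (string : String), Dom_return_answer_parts string → Spec_return_answer_parts string (return_answer_parts string)


-- ===== LEMMAS AND PROOFS =====

-- The canonical value both loops compute: for each border length k = j+1
-- (j = 0, …, n-2) in increasing order, keep the prefix when it equals the suffix.
def pvCanonUpTo (s : List Char) (m : Nat) : List String :=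
  (List.range m).foldl
    (fun r j => if s.take (j+1) = s.drop (s.length - (j+1))
      then r ++ [String.ofList (s.take (j+1))] else r) []

def pvCanon (s : List Char) : List String := pvCanonUpTo s (s.length - 1)

-- A's loop body, named (definitionally equal to the lambda in the port)
def pvStepA (s : List Char) (st : List Char × List Char × List String) (i : Int) :
    List Char × List Char × List String :=
  let pre := st.1 ++ [(PySem.List.pyGet? s i).getD ' ']
  let suf := (PySem.List.pyGet? s (-i - 1)).getD ' ' :: st.2.1
  if pre = suf then (pre, suf, st.2.2 ++ [String.ofList pre]) else (pre, suf, st.2.2)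

-- B's loop body, named (definitionally equal to the lambda in the port)
def pvStepB (s : List Char) (n : Int) (res : List String) (p : Int) : List String :=
  if (PySem.List.pyRange 0 (n - p) 1).all
      (fun i => PySem.List.pyGetD s i ' ' == PySem.List.pyGetD s (i + p) ' ')
    then res ++ [String.ofList (PySem.List.slice s none (some (n - p)))]
    else res

theorem pvCanonUpTo_succ (s : List Char) (m : Nat) :
    pvCanonUpTo s (m+1) =
      if s.take (m+1) = s.drop (s.length - (m+1))
        then pvCanonUpTo s m ++ [String.ofList (s.take (m+1))] else pvCanonUpTo s m := by
  unfold pvCanonUpTo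
  rw [List.range_succ, List.foldl_append]
  simp

theorem pvA_loop (s : List Char) (m : Nat) (hm : m ≤ s.length - 1) :
    ((List.range m).map (fun (k : Nat) => ((0:Int) + (k:Int)))).foldl (pvStepA s) ([], [], [])
      = (s.take m, s.drop (s.length - m), pvCanonUpTo s m) := by
  induction m with
  | zero => simp [pvCanonUpTo]
  | succ m ih =>
    have hlen : m + 1 < s.length := by omega
    rw [List.range_succ, List.map_append, List.foldl_append, ih (by omega)]
    simp only [List.map_cons, List.map_nil, List.foldl_cons, List.foldl_nil]
    have hpre : s.take m ++ [(PySem.List.pyGet? s ((0:Int) + (m:Int))).getD ' ']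
        = s.take (m+1) := by
      have h0 : ((0:Int) + (m:Int)) = ((m:Nat):Int) := by ring
      rw [h0, PySem.List.pyGet?_natCast, List.take_add_one,
        List.getElem?_eq_getElem (by omega)]
      rfl
    have hsuf : (PySem.List.pyGet? s (-((0:Int) + (m:Int)) - 1)).getD ' '
          :: s.drop (s.length - m) = s.drop (s.length - (m+1)) := by
      have h1 : (-((0:Int) + (m:Int)) - 1) = -(((m+1 : Nat)):Int) := by push_cast; ring
      rw [h1, PySem.List.pyGet?_neg_natCast s (m+1) (by omega) (by omega),
        List.getElem?_eq_getElem (by omega)]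
      rw [List.drop_eq_getElem_cons (show s.length - (m+1) < s.length by omega)]
      have h2 : s.length - (m+1) + 1 = s.length - m := by omega
      rw [h2]
      rfl
    show pvStepA s (s.take m, s.drop (s.length - m), pvCanonUpTo s m) ((0:Int) + (m:Int))
        = (s.take (m+1), s.drop (s.length - (m+1)), pvCanonUpTo s (m+1))
    unfold pvStepA
    simp only [hpre, hsuf, pvCanonUpTo_succ]
    split_ifs <;> rfl

theorem pvA_eq (str : String) : return_answer_parts str = pvCanon str.toList := by
  show (((PySem.List.pyRange 0 ((str.toList.length : Int) - 1) 1).foldl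
      (pvStepA str.toList) ([], [], []))).2.2 = pvCanon str.toList
  rw [PySem.List.pyRange_one]
  have ht : (((str.toList.length : Int) - 1) - 0).toNat = str.toList.length - 1 := by omega
  rw [ht, pvA_loop str.toList (str.toList.length - 1) le_rfl]
  rfl

-- the pointwise-shift condition of B is exactly "prefix of length k = suffix of length k"
theorem pvB_all_iff (s : List Char) (k p : Nat) (hkp : k + p = s.length) (hk : 0 < p) :
    ((PySem.List.pyRange 0 ((k:Nat):Int) 1).all
        (fun i => PySem.List.pyGetD s i ' ' == PySem.List.pyGetD s (i + ((p:Nat):Int)) ' ') = true)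
      ↔ s.take k = s.drop p := by
  rw [PySem.List.pyRange_one]
  have ht : (((k:Nat):Int) - 0).toNat = k := by omega
  rw [ht, List.all_map, List.all_eq_true]
  have hstep : ∀ x : Nat, x < k →
      (((fun i => PySem.List.pyGetD s i ' ' == PySem.List.pyGetD s (i + ((p:Nat):Int)) ' ')
          ∘ fun j => (0:Int) + (j:Nat)) x = true ↔ s.getD x ' ' = s.getD (x + p) ' ') := by
    intro x hx
    have h0 : ((0:Int) + (x:Nat)) = ((x:Nat):Int) := by ring
    have h1 : (((x:Nat):Int) + ((p:Nat):Int)) = (((x + p : Nat)):Int) := by push_cast; ring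
    simp only [Function.comp, h0, h1, PySem.List.pyGetD_natCast, beq_iff_eq]
  constructor
  · intro h
    apply List.ext_getElem (by simp; omega)
    intro i h1 h2
    have hi : i < k := by simp at h1; omega
    have hv := (hstep i hi).mp (h _ (List.mem_range.mpr hi))
    rw [List.getD_eq_getElem s ' ' (show i < s.length by omega),
      List.getD_eq_getElem s ' ' (show i + p < s.length by omega)] at hv
    simpa [List.getElem_take, List.getElem_drop, Nat.add_comm] using hv
  · intro h x hx
    have hxk : x < k := List.mem_range.mp hx
    apply (hstep x hxk).mpr
    have h1 : (s.take k)[x]'(by simp; omega) = (s.drop p)[x]'(by simp; omega) := by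
      simp only [h]
    rw [List.getElem_take, List.getElem_drop] at h1
    rw [List.getD_eq_getElem s ' ' (show x < s.length by omega),
      List.getD_eq_getElem s ' ' (show x + p < s.length by omega)]
    simp only [Nat.add_comm p x] at h1
    exact h1

theorem pvB_step (s : List Char) (j : Nat) (hj : j < s.length - 1) (r : List String) :
    pvStepB s (s.length : Int) r ((s.length : Int) - 1 - (j:Nat)) =
      if s.take (j+1) = s.drop (s.length - (j+1))
        then r ++ [String.ofList (s.take (j+1))] else r := by
  unfold pvStepB
  have harg : ((s.length : Int) - ((s.length : Int) - 1 - (j:Nat))) = (((j+1 : Nat)):Int) := by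
    push_cast; ring
  have hp : ((s.length : Int) - 1 - (j:Nat)) = (((s.length - (j+1) : Nat)):Int) := by omega
  rw [harg, hp, PySem.List.slice_to_natCast]
  by_cases hcond : s.take (j+1) = s.drop (s.length - (j+1))
  · rw [if_pos ((pvB_all_iff s (j+1) (s.length - (j+1)) (by omega) (by omega)).mpr hcond),
      if_pos hcond]
  · rw [if_neg (fun hall =>
      hcond ((pvB_all_iff s (j+1) (s.length - (j+1)) (by omega) (by omega)).mp hall)),
      if_neg hcond]

theorem pvB_loop (s : List Char) (m : Nat) (hm : m ≤ s.length - 1) :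
    ((List.range m).map (fun (k : Nat) => ((s.length : Int) - 1) - (k:Int))).foldl
        (pvStepB s (s.length : Int)) []
      = pvCanonUpTo s m := by
  induction m with
  | zero => simp [pvCanonUpTo]
  | succ m ih =>
    rw [List.range_succ, List.map_append, List.foldl_append, ih (by omega)]
    simp only [List.map_cons, List.map_nil, List.foldl_cons, List.foldl_nil]
    rw [pvB_step s m (by omega), pvCanonUpTo_succ]

theorem pvB_eq (str : String) : return_answer_parts_alt str = pvCanon str.toList := by
  show (PySem.List.pyRange ((str.toList.length : Int) - 1) 0 (-1)).foldl
      (pvStepB str.toList (str.toList.length : Int)) [] = pvCanon str.toList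
  rw [PySem.List.pyRange_neg_one]
  have ht : (((str.toList.length : Int) - 1) - 0).toNat = str.toList.length - 1 := by omega
  rw [ht, pvB_loop str.toList (str.toList.length - 1) le_rfl]
  rfl

-- ===== VERDICT (by name: the statement is the Claim_ definition above) =====
theorem return_answer_parts_spec : Claim_equal_return_answer_parts := by
  intro string _
  unfold Spec_return_answer_parts
  rw [pvA_eq, pvB_eq]
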